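-- pv_equiv track=rewrite | github.com/peytonwates24/RFP_Analysis_Automation2 | Optimizaiton_Example_Universal_Capacity_multi.py | compute_U_volume
-- ===== SOURCE A (Python) =====
-- suppliers = ['A', 'B', 'C']
--
-- items = ['item1', 'item2', 'item3']
--
-- def compute_U_volume(per_item_cap):
--     total = {}
--     for s in suppliers:
--         tot = 0
--         for j in items:
--             tot += per_item_cap.get((s, j), 0)
--         total[s] = tot
--     return total
-- ===== SOURCE B (Python) =====
-- suppliers = ['A', 'B', 'C']
--
-- items = ['item1', 'item2', 'item3']
--
-- def compute_U_volume(per_item_cap):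
--     grid = {(s, j) for s in suppliers for j in items}
--     total = {s: 0 for s in suppliers}
--     for key, v in per_item_cap.items():
--         if key in grid:
--             total[key[0]] += v
--     return total
-- ===== Notes on version B (the rewrite author's own statement) =====
-- stated objective: alternative
-- what changed: Instead of A's grid-driven nested loop (for each supplier, for each item, a dict.get lookup), B precomputes the supplier-item grid as a set and a zero-initialized total per supplier, then makes a single data-driven pass over per_item_cap's own entries, adding each value whose key lies on the grid to its supplier's total.
import Mathlib
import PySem

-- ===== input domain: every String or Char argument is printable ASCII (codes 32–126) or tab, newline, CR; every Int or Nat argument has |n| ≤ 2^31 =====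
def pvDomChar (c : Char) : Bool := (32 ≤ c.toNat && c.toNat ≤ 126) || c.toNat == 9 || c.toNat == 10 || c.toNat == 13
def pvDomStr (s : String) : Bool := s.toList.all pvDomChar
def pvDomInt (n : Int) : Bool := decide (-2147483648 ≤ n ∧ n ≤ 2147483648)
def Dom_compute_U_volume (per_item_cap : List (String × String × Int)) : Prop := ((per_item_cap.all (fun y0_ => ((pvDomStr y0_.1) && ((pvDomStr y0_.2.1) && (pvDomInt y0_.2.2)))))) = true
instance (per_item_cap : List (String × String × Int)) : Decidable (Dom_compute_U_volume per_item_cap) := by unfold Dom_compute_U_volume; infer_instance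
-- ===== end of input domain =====

-- B replaces A's nested suppliers×items lookup loop with one data-driven pass over the
-- dict's own entries guided by a precomputed grid set (objective: alternative decomposition).

-- module-level constants
def pvSuppliers : List String := ["A", "B", "C"]
def pvItems : List String := ["item1", "item2", "item3"]

-- ===== PORT A =====
-- per_item_cap.get((s, j), 0): first-match lookup in the association list (= dict.get with default 0)
def pvGetCap : List (String × String × Int) → String → String → Int
  | [], _, _ => 0
  | p :: rest, s, j => if p.1 = s ∧ p.2.1 = j then p.2.2 else pvGetCap rest s j

def compute_U_volume (per_item_cap : List (String × String × Int)) : List (String × Int) :=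
  (pvSuppliers.foldl (fun total s =>
      total.insert s (pvItems.foldl (fun tot j => tot + pvGetCap per_item_cap s j) 0))
    PySem.Dict.empty).items

-- ===== PORT B =====
def compute_U_volume_alt (per_item_cap : List (String × String × Int)) : List (String × Int) :=
  let grid : PySem.Set (String × String) :=
    PySem.Set.ofList (pvSuppliers.flatMap (fun s => pvItems.map (fun j => (s, j))))
  let total0 : PySem.Dict String Int :=
    pvSuppliers.foldl (fun d s => d.insert s 0) PySem.Dict.empty
  (per_item_cap.foldl (fun total p =>
      if grid.contains (p.1, p.2.1) then total.modify p.1 0 (· + p.2.2) else total)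
    total0).items

-- ===== PRECONDITION & SPEC =====
-- Pre_ excludes association lists with a duplicated (supplier, item) key; no Python dict
-- produces one, and on such lists A's first-match lookup and B's summation are both accidental.
def Pre_compute_U_volume (per_item_cap : List (String × String × Int)) : Prop :=
  (per_item_cap.map (fun p => (p.1, p.2.1))).Nodup
instance (per_item_cap : List (String × String × Int)) : Decidable (Pre_compute_U_volume per_item_cap) := by unfold Pre_compute_U_volume; infer_instance

def pvWitness_compute_U_volume : (List (String × String × Int)) :=
  [("A", "item1", 3), ("B", "item2", 5), ("Z", "x", 7)]

def Spec_compute_U_volume (per_item_cap : List (String × String × Int)) (out : List (String × Int)) : Prop := out = compute_U_volume_alt per_item_cap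
instance (per_item_cap : List (String × String × Int)) (out : List (String × Int)) : Decidable (Spec_compute_U_volume per_item_cap out) := by unfold Spec_compute_U_volume; infer_instance

-- ===== CLAIM (what is proved, stated in full; the proofs are below) =====
def Claim_equal_compute_U_volume : Prop := ∀ (per_item_cap : List (String × String × Int)), Dom_compute_U_volume per_item_cap → Pre_compute_U_volume per_item_cap → Spec_compute_U_volume per_item_cap (compute_U_volume per_item_cap)

-- ===== LEMMAS AND PROOFS =====

-- per-(s,j) and per-s sums over the entry list
def pvSj (s j : String) (l : List (String × String × Int)) : Int :=
  ((l.filter (fun p => p.1 = s ∧ p.2.1 = j)).map (·.2.2)).sum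
def pvStot (s : String) (l : List (String × String × Int)) : Int :=
  pvSj s "item1" l + pvSj s "item2" l + pvSj s "item3" l
def pvSB (s : String) (l : List (String × String × Int)) : Int :=
  ((l.filter (fun p => p.1 = s ∧ (p.2.1 = "item1" ∨ p.2.1 = "item2" ∨ p.2.1 = "item3"))).map (·.2.2)).sum

lemma pvSj_of_not_mem (s j : String) (l : List (String × String × Int))
    (h : (s, j) ∉ l.map (fun p => (p.1, p.2.1))) : pvSj s j l = 0 := by
  induction l with
  | nil => rfl
  | cons p rest ih =>
    simp only [List.map_cons, List.mem_cons] at h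
    push_neg at h
    have hne : ¬ (p.1 = s ∧ p.2.1 = j) := by
      intro ⟨h1, h2⟩; exact h.1 (by rw [← h1, ← h2])
    simp [pvSj, List.filter_cons, hne] at *
    exact ih h.2

lemma pvGetCap_eq_pvSj (s j : String) (l : List (String × String × Int))
    (hn : (l.map (fun p => (p.1, p.2.1))).Nodup) : pvGetCap l s j = pvSj s j l := by
  induction l with
  | nil => rfl
  | cons p rest ih =>
    simp only [List.map_cons, List.nodup_cons] at hn
    by_cases hm : p.1 = s ∧ p.2.1 = j
    · have hrest : (s, j) ∉ rest.map (fun q => (q.1, q.2.1)) := by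
        rw [← hm.1, ← hm.2]; exact hn.1
      simp [pvGetCap, pvSj, List.filter_cons, hm, pvSj_of_not_mem s j rest hrest]
      have := pvSj_of_not_mem s j rest hrest
      simp [pvSj] at this
      simp [this]
    · simp [pvGetCap, pvSj, List.filter_cons, hm] at *
      exact ih hn.2

lemma pvStot_eq_pvSB (s : String) (l : List (String × String × Int)) :
    pvStot s l = pvSB s l := by
  induction l with
  | nil => rfl
  | cons p rest ih =>
    by_cases h1 : p.1 = s ∧ p.2.1 = "item1"
    · have : p.2.1 = "item1" := h1.2
      simp [pvStot, pvSj, pvSB, List.filter_cons, h1, h1.1, this] at *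
      omega
    · by_cases h2 : p.1 = s ∧ p.2.1 = "item2"
      · simp [pvStot, pvSj, pvSB, List.filter_cons, h1, h2, h2.1, h2.2] at *
        omega
      · by_cases h3 : p.1 = s ∧ p.2.1 = "item3"
        · simp [pvStot, pvSj, pvSB, List.filter_cons, h1, h2, h3, h3.1, h3.2] at *
          omega
        · have hb : ¬ (p.1 = s ∧ (p.2.1 = "item1" ∨ p.2.1 = "item2" ∨ p.2.1 = "item3")) := by
            rintro ⟨hs, hj | hj | hj⟩
            · exact h1 ⟨hs, hj⟩
            · exact h2 ⟨hs, hj⟩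
            · exact h3 ⟨hs, hj⟩
          simp [pvStot, pvSj, pvSB, List.filter_cons, h1, h2, h3, hb] at *
          omega

lemma A_items (l : List (String × String × Int)) (hn : (l.map (fun p => (p.1, p.2.1))).Nodup) :
    compute_U_volume l = [("A", pvStot "A" l), ("B", pvStot "B" l), ("C", pvStot "C" l)] := by
  simp [compute_U_volume, pvSuppliers, pvItems, pvStot,
    pvGetCap_eq_pvSj _ _ _ hn, PySem.Dict.items_insert, PySem.Dict.insert, PySem.Dict.empty]

lemma grid_mem (x y : String) :
    ((x, y) ∈ PySem.Set.ofList (pvSuppliers.flatMap (fun s => pvItems.map (fun j => (s, j)))))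
    ↔ ((x = "A" ∨ x = "B" ∨ x = "C") ∧ (y = "item1" ∨ y = "item2" ∨ y = "item3")) := by
  rw [PySem.Set.mem_ofList]
  simp [pvSuppliers, pvItems, Prod.ext_iff]
  tauto

lemma B_fold (l : List (String × String × Int)) (a b c : Int) :
    (l.foldl (fun total p =>
        if (PySem.Set.ofList (pvSuppliers.flatMap (fun s => pvItems.map (fun j => (s, j))))).contains (p.1, p.2.1)
        then total.modify p.1 0 (· + p.2.2) else total)
      (PySem.Dict.mk [("A", a), ("B", b), ("C", c)])).items
    = [("A", a + pvSB "A" l), ("B", b + pvSB "B" l), ("C", c + pvSB "C" l)] := by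
  induction l generalizing a b c with
  | nil => simp [pvSB]
  | cons p rest ih =>
    simp only [List.foldl_cons]
    by_cases hin : (p.1 = "A" ∨ p.1 = "B" ∨ p.1 = "C") ∧ (p.2.1 = "item1" ∨ p.2.1 = "item2" ∨ p.2.1 = "item3")
    · rw [if_pos (by rw [PySem.Set.contains_iff, grid_mem]; exact hin)]
      obtain ⟨hs, hj⟩ := hin
      rcases hs with hs | hs | hs <;> rcases hj with hj | hj | hj <;>
        (rw [hs]; first
          | rw [show ((PySem.Dict.mk [("A", a), ("B", b), ("C", c)]).modify "A" 0 (· + p.2.2))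
                = PySem.Dict.mk [("A", a + p.2.2), ("B", b), ("C", c)] from rfl]
          | rw [show ((PySem.Dict.mk [("A", a), ("B", b), ("C", c)]).modify "B" 0 (· + p.2.2))
                = PySem.Dict.mk [("A", a), ("B", b + p.2.2), ("C", c)] from rfl]
          | rw [show ((PySem.Dict.mk [("A", a), ("B", b), ("C", c)]).modify "C" 0 (· + p.2.2))
                = PySem.Dict.mk [("A", a), ("B", b), ("C", c + p.2.2)] from rfl]) <;>
        rw [ih] <;> simp [pvSB, List.filter_cons, hs, hj] <;> omega
    · rw [if_neg (by rw [PySem.Set.contains_iff, grid_mem]; exact hin)]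
      rw [ih]
      have hA : ¬ (p.1 = "A" ∧ (p.2.1 = "item1" ∨ p.2.1 = "item2" ∨ p.2.1 = "item3")) :=
        fun ⟨h1, h2⟩ => hin ⟨Or.inl h1, h2⟩
      have hB : ¬ (p.1 = "B" ∧ (p.2.1 = "item1" ∨ p.2.1 = "item2" ∨ p.2.1 = "item3")) :=
        fun ⟨h1, h2⟩ => hin ⟨Or.inr (Or.inl h1), h2⟩
      have hC : ¬ (p.1 = "C" ∧ (p.2.1 = "item1" ∨ p.2.1 = "item2" ∨ p.2.1 = "item3")) :=
        fun ⟨h1, h2⟩ => hin ⟨Or.inr (Or.inr h1), h2⟩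
      simp [pvSB, List.filter_cons, hA, hB, hC]

lemma B_items (l : List (String × String × Int)) :
    compute_U_volume_alt l = [("A", pvSB "A" l), ("B", pvSB "B" l), ("C", pvSB "C" l)] := by
  have := B_fold l 0 0 0
  simpa [compute_U_volume_alt] using this

-- ===== VERDICT (by name: the statement is the Claim_ definition above) =====
theorem compute_U_volume_spec : Claim_equal_compute_U_volume := by
  intro l _ hpre
  unfold Spec_compute_U_volume
  rw [A_items l hpre, B_items l]
  simp [pvStot_eq_pvSB]
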